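-- pv_equiv track=rewrite | github.com/BardOfCodes/messy_coref | CSG/algo_utils/exp_buffer.py | get_splitting_indices
-- ===== SOURCE A (Python) =====
-- def get_splitting_indices(current_buffer_size, batch_size, episode_starts):
--     """[summary]
--     Given current buffer size, return splitting indexest to create a buffer
--     based on the episode starts.
--     Args:
--         current_buffer_size ([type]): [description]
--         batch_size ([type]): [description]
--         episode_starts ([type]): [description]
--
--     Returns:
--         [type]: [description]
--     """
--     batch_indices = []
--     cur_batch_idx = 0
--     append_idx = True
--     while((cur_batch_idx + batch_size) < current_buffer_size):
--         new_idx = cur_batch_idx + batch_size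
--         ep_start =  episode_starts[new_idx]
--         while(not ep_start):
--             new_idx += 1
--             if new_idx == current_buffer_size:
--                 # Reached the end of the buffer
--                 append_idx = False
--                 break
--             ep_start =  episode_starts[new_idx]
--         if append_idx:
--            batch_indices.append(new_idx)
--         cur_batch_idx = new_idx
--     return batch_indices
-- ===== SOURCE B (Python) =====
-- def get_splitting_indices(current_buffer_size, batch_size, episode_starts):
--     batch_indices = []
--     threshold = batch_size
--     for i in range(batch_size, current_buffer_size):
--         if i >= threshold and episode_starts[i]:
--             batch_indices.append(i)
--             threshold = i + batch_size
--     return batch_indices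
-- ===== Notes on version B (the rewrite author's own statement) =====
-- stated objective: simpler
-- what changed: Replaces the nested while-loop (outer jump plus inner boundary scan with a sticky append flag) by a single flat for-loop over indices with a running threshold accumulator that marks where the next batch may end.
-- outside the precondition, e.g. on get_splitting_indices(4, 2, [False, False, True]): A returns [2], B returns [2]
import Mathlib
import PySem

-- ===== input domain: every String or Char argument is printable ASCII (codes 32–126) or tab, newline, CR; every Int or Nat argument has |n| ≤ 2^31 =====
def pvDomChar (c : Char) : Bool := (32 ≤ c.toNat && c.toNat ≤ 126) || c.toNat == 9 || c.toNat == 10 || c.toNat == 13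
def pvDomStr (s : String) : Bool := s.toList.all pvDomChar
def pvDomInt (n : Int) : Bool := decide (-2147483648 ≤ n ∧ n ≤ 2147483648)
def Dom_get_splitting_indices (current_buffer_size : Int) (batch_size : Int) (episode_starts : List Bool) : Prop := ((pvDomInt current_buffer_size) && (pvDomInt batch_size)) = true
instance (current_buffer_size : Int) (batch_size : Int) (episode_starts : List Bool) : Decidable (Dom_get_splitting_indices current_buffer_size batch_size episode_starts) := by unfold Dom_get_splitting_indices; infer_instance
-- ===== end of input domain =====

-- B replaces A's nested while-loops (outer jump + inner boundary scan with a sticky append flag)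
-- by one flat sweep over the index range guarded by a running threshold; objective: simpler.

-- ===== PORT A =====
-- inner 'while(not ep_start)' loop of A; fuel only makes the recursion total (A raises or
-- diverges on inputs outside Pre_, where the fuel could run out).
def pvInnerA (episode_starts : List Bool) (current_buffer_size : Int) :
    Nat → Int → Bool → Int × Bool
  | fuel, new_idx, append_idx =>
    if (PySem.List.pyGet? episode_starts new_idx).getD false then
      (new_idx, append_idx)
    else if new_idx + 1 = current_buffer_size then
      (new_idx + 1, false)
    else
      match fuel with
      | 0 => (new_idx + 1, append_idx)
      | fuel + 1 => pvInnerA episode_starts current_buffer_size fuel (new_idx + 1) append_idx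

-- outer 'while((cur_batch_idx + batch_size) < current_buffer_size)' loop of A
def pvOuterA (episode_starts : List Bool) (current_buffer_size batch_size : Int) :
    Nat → Int → Bool → List Int → List Int
  | fuel, cur_batch_idx, append_idx, batch_indices =>
    if cur_batch_idx + batch_size < current_buffer_size then
      let r := pvInnerA episode_starts current_buffer_size
                 (current_buffer_size - (cur_batch_idx + batch_size)).toNat
                 (cur_batch_idx + batch_size) append_idx
      let batch_indices' := if r.2 then batch_indices ++ [r.1] else batch_indices
      match fuel with
      | 0 => batch_indices'
      | fuel + 1 => pvOuterA episode_starts current_buffer_size batch_size fuel r.1 r.2 batch_indices'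
    else batch_indices

def get_splitting_indices (current_buffer_size : Int) (batch_size : Int) (episode_starts : List Bool) : List Int :=
  pvOuterA episode_starts current_buffer_size batch_size (current_buffer_size.toNat + 1) 0 true []

-- ===== PORT B =====
-- body of B's single for-loop: state is (threshold, batch_indices)
def pvStepB (batch_size : Int) (episode_starts : List Bool) (st : Int × List Int) (i : Int) :
    Int × List Int :=
  if st.1 ≤ i ∧ (PySem.List.pyGet? episode_starts i).getD false then
    (i + batch_size, st.2 ++ [i])
  else st

def get_splitting_indices_alt (current_buffer_size : Int) (batch_size : Int) (episode_starts : List Bool) : List Int :=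
  ((PySem.List.pyRange batch_size current_buffer_size 1).foldl
    (pvStepB batch_size episode_starts) (batch_size, [])).2

-- ===== PRECONDITION & SPEC =====
-- Pre_ keeps the natural domain on which A returns: a positive batch size with the buffer size
-- within the list (otherwise A infinite-loops, wraps negative indices or raises IndexError),
-- plus the trivially-empty case current_buffer_size ≤ batch_size where A's loop never runs.
-- It excludes a few inputs with current_buffer_size above the list length on which A happens to
-- return before indexing out of range; matching there would rely on that accident.
def Pre_get_splitting_indices (current_buffer_size : Int) (batch_size : Int) (episode_starts : List Bool) : Prop :=
  (0 < batch_size ∧ current_buffer_size ≤ (episode_starts.length : Int)) ∨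
    current_buffer_size ≤ batch_size
instance (current_buffer_size : Int) (batch_size : Int) (episode_starts : List Bool) : Decidable (Pre_get_splitting_indices current_buffer_size batch_size episode_starts) := by unfold Pre_get_splitting_indices; infer_instance

def pvWitness_get_splitting_indices : Int × Int × List Bool := (4, 2, [false, true, false, true])

def Spec_get_splitting_indices (current_buffer_size : Int) (batch_size : Int) (episode_starts : List Bool) (out : List Int) : Prop := out = get_splitting_indices_alt current_buffer_size batch_size episode_starts
instance (current_buffer_size : Int) (batch_size : Int) (episode_starts : List Bool) (out : List Int) : Decidable (Spec_get_splitting_indices current_buffer_size batch_size episode_starts out) := by unfold Spec_get_splitting_indices; infer_instance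

-- ===== CLAIM (what is proved, stated in full; the proofs are below) =====
def Claim_equal_get_splitting_indices : Prop := ∀ (current_buffer_size : Int) (batch_size : Int) (episode_starts : List Bool), Dom_get_splitting_indices current_buffer_size batch_size episode_starts → Pre_get_splitting_indices current_buffer_size batch_size episode_starts → Spec_get_splitting_indices current_buffer_size batch_size episode_starts (get_splitting_indices current_buffer_size batch_size episode_starts)

-- ===== LEMMAS AND PROOFS =====

-- first index i ∈ [j, size) whose entry is truthy (spec of A's inner scan)
def pvFirst? (episode_starts : List Bool) (size j : Int) : Option Int :=
  if h : j < size then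
    if (PySem.List.pyGet? episode_starts j).getD false then some j
    else pvFirst? episode_starts size (j + 1)
  else none
termination_by (size - j).toNat
decreasing_by omega

theorem pvFirst?_some (es : List Bool) (size : Int) :
    ∀ (n : Nat) (j i : Int), (size - j).toNat = n → pvFirst? es size j = some i →
    j ≤ i ∧ i < size ∧ (PySem.List.pyGet? es i).getD false = true := by
  intro n
  induction n with
  | zero =>
    intro j i hn h
    rw [pvFirst?, dif_neg (by omega)] at h
    exact absurd h (by simp)
  | succ n ih =>
    intro j i hn h
    rw [pvFirst?] at h
    by_cases hj : j < size
    · rw [dif_pos hj] at h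
      by_cases hg : (PySem.List.pyGet? es j).getD false = true
      · rw [if_pos hg] at h
        cases h
        exact ⟨le_refl _, hj, hg⟩
      · rw [if_neg hg] at h
        have := ih (j + 1) i (by omega) h
        exact ⟨by omega, this.2⟩
    · rw [dif_neg hj] at h
      exact absurd h (by simp)

theorem pvInnerA_eq (es : List Bool) (size : Int) :
    ∀ (fuel : Nat) (j : Int) (ai : Bool), j < size → (size - j).toNat ≤ fuel + 1 →
    pvInnerA es size fuel j ai =
      match pvFirst? es size j with
      | some i => (i, ai)
      | none => (size, false) := by
  intro fuel
  induction fuel with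
  | zero =>
    intro j ai hj hf
    rw [pvInnerA, pvFirst?, dif_pos hj]
    by_cases hg : (PySem.List.pyGet? es j).getD false = true
    · rw [if_pos hg, if_pos hg]
    · rw [if_neg hg, if_neg hg]
      have hjs : j + 1 = size := by omega
      rw [if_pos hjs, pvFirst?, dif_neg (by omega), hjs]
  | succ fuel ih =>
    intro j ai hj hf
    rw [pvInnerA, pvFirst?, dif_pos hj]
    by_cases hg : (PySem.List.pyGet? es j).getD false = true
    · rw [if_pos hg, if_pos hg]
    · rw [if_neg hg, if_neg hg]
      by_cases hjs : j + 1 = size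
      · rw [if_pos hjs, pvFirst?, dif_neg (by omega), hjs]
      · rw [if_neg hjs]
        exact ih (j + 1) ai (by omega) (by omega)

theorem pvSkipB (batch : Int) (es : List Bool) (size : Int) :
    ∀ (n : Nat) (j t : Int) (res : List Int), (size - j).toNat = n → j ≤ t →
    (PySem.List.pyRange j size 1).foldl (pvStepB batch es) (t, res) =
      (PySem.List.pyRange t size 1).foldl (pvStepB batch es) (t, res) := by
  intro n
  induction n with
  | zero =>
    intro j t res hn ht
    rw [PySem.List.pyRange_one_eq_nil (by omega), PySem.List.pyRange_one_eq_nil (by omega)]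
  | succ n ih =>
    intro j t res hn ht
    by_cases hjt : j = t
    · rw [hjt]
    · rw [PySem.List.pyRange_one_cons (by omega), List.foldl_cons]
      have hstep : pvStepB batch es (t, res) j = (t, res) := by
        unfold pvStepB
        rw [if_neg]
        intro h
        omega
      rw [hstep]
      exact ih (j + 1) t res (by omega) (by omega)

theorem pvScanB (batch : Int) (es : List Bool) (size : Int) :
    ∀ (n : Nat) (j t : Int) (res : List Int), (size - j).toNat = n → t ≤ j →
    (PySem.List.pyRange j size 1).foldl (pvStepB batch es) (t, res) =
      match pvFirst? es size j with
      | none => (t, res)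
      | some i => (PySem.List.pyRange (i + 1) size 1).foldl (pvStepB batch es)
                    (i + batch, res ++ [i]) := by
  intro n
  induction n with
  | zero =>
    intro j t res hn ht
    rw [PySem.List.pyRange_one_eq_nil (by omega), pvFirst?, dif_neg (by omega), List.foldl_nil]
  | succ n ih =>
    intro j t res hn ht
    rw [PySem.List.pyRange_one_cons (by omega), List.foldl_cons, pvFirst?, dif_pos (by omega)]
    by_cases hg : (PySem.List.pyGet? es j).getD false = true
    · rw [if_pos hg]
      have hstep : pvStepB batch es (t, res) j = (j + batch, res ++ [j]) := by
        unfold pvStepB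
        rw [if_pos ⟨ht, hg⟩]
      rw [hstep]
    · rw [if_neg hg]
      have hstep : pvStepB batch es (t, res) j = (t, res) := by
        unfold pvStepB
        rw [if_neg]
        intro h
        exact hg h.2
      rw [hstep]
      exact ih (j + 1) t res (by omega) (by omega)

theorem pvMain (batch : Int) (es : List Bool) (size : Int) (hb : 0 < batch) :
    ∀ (fuel : Nat) (cur : Int) (acc : List Int), 0 ≤ cur → (size - cur).toNat ≤ fuel →
    pvOuterA es size batch fuel cur true acc =
      ((PySem.List.pyRange (cur + batch) size 1).foldl (pvStepB batch es) (cur + batch, acc)).2 := by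
  intro fuel
  induction fuel with
  | zero =>
    intro cur acc hc hf
    rw [pvOuterA, if_neg (by omega), PySem.List.pyRange_one_eq_nil (by omega), List.foldl_nil]
  | succ fuel ih =>
    intro cur acc hc hf
    rw [pvOuterA]
    by_cases hcond : cur + batch < size
    · rw [if_pos hcond]
      rw [pvInnerA_eq es size _ _ _ hcond (by omega)]
      cases hfi : pvFirst? es size (cur + batch) with
      | none =>
        show pvOuterA es size batch fuel size false acc =
          ((PySem.List.pyRange (cur + batch) size 1).foldl (pvStepB batch es) (cur + batch, acc)).2
        rw [pvOuterA, if_neg (show ¬ size + batch < size by omega)]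
        rw [pvScanB batch es size (size - (cur + batch)).toNat (cur + batch) (cur + batch) acc rfl
          (le_refl _), hfi]
      | some i =>
        show pvOuterA es size batch fuel i true (acc ++ [i]) =
          ((PySem.List.pyRange (cur + batch) size 1).foldl (pvStepB batch es) (cur + batch, acc)).2
        have hi := pvFirst?_some es size (size - (cur + batch)).toNat (cur + batch) i rfl hfi
        rw [pvScanB batch es size (size - (cur + batch)).toNat (cur + batch) (cur + batch) acc rfl
          (le_refl _), hfi]
        show pvOuterA es size batch fuel i true (acc ++ [i]) =
          ((PySem.List.pyRange (i + 1) size 1).foldl (pvStepB batch es) (i + batch, acc ++ [i])).2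
        rw [pvSkipB batch es size (size - (i + 1)).toNat (i + 1) (i + batch) (acc ++ [i]) rfl
          (by omega)]
        exact ih i (acc ++ [i]) (by omega) (by omega)
    · rw [if_neg hcond, PySem.List.pyRange_one_eq_nil (by omega), List.foldl_nil]

-- ===== VERDICT (by name: the statement is the Claim_ definition above) =====
theorem get_splitting_indices_spec : Claim_equal_get_splitting_indices := by
  intro size batch es _hdom hpre
  unfold Spec_get_splitting_indices get_splitting_indices get_splitting_indices_alt
  rcases hpre with ⟨hb, _hlen⟩ | hle
  · have h := pvMain batch es size hb (size.toNat + 1) 0 [] (le_refl 0) (by omega)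
    rw [zero_add] at h
    exact h
  · by_cases hb : batch < size
    · omega
    · rw [pvOuterA, if_neg (by omega), PySem.List.pyRange_one_eq_nil (by omega), List.foldl_nil]
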